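-- pv_equiv track=rewrite | github.com/RyanPioneer/Leetcode | 2501~3000/2516. Take K of Each Character From Left and Right/main.py | takeCharacters
-- ===== SOURCE A (Python) =====
-- def takeCharacters(s: str, k: int) -> int:
--     left, right, sz, res = 0, 0, len(s), 0
--     a_num, b_num, c_num = -k, -k, -k
--     for i in range(sz):
--         if s[i] == "a":
--             a_num += 1
--         elif s[i] == "b":
--             b_num += 1
--         else:
--             c_num += 1
--
--     if a_num < 0 or b_num < 0 or c_num < 0:
--         return -1
--
--     cur_a, cur_b, cur_c = 0, 0, 0
--     for left in range(sz):
--         while cur_a <= a_num and cur_b <= b_num and cur_c <= c_num: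
--             res = max(res, right - left)
--             if right == sz:
--                 return sz - res
--             if s[right] == "a":
--                 cur_a += 1
--             elif s[right] == "b":
--                 cur_b += 1
--             else:
--                 cur_c += 1
--             right += 1
--
--         if s[left] == "a":
--             cur_a -= 1
--         elif s[left] == "b":
--             cur_b -= 1
--         else:
--             cur_c -= 1
--
--     return sz - res
-- ===== SOURCE B (Python) =====
-- def takeCharacters(s: str, k: int) -> int:
--     # Binary search on the answer m (total characters taken), using prefix-sum
--     # arrays: m is feasible iff some split i + (m - i) of prefix/suffix covers
--     # >= k of each bucket ('a', 'b', everything else). Feasibility is monotone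
--     # in m, so the least feasible m is found by bisection.
--     n = len(s)
--     pa = pb = pc = 0
--     Pa, Pb, Pc = [0], [0], [0]
--     for ch in s:
--         if ch == "a":
--             pa += 1
--         elif ch == "b":
--             pb += 1
--         else:
--             pc += 1
--         Pa.append(pa)
--         Pb.append(pb)
--         Pc.append(pc)
--     if Pa[n] < k or Pb[n] < k or Pc[n] < k:
--         return -1
--
--     def ok(m):
--         for i in range(m + 1):
--             j = m - i
--             if (Pa[i] + Pa[n] - Pa[n - j] >= k
--                     and Pb[i] + Pb[n] - Pb[n - j] >= k
--                     and Pc[i] + Pc[n] - Pc[n - j] >= k):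
--                 return True
--         return False
--
--     lo, hi = 0, n
--     while lo < hi:
--         mid = (lo + hi) // 2
--         if ok(mid):
--             hi = mid
--         else:
--             lo = mid + 1
--     return lo
-- ===== Notes on version B (the rewrite author's own statement) =====
-- stated objective: alternative
-- what changed: A finds the maximal removable middle window with an expand-right sliding window; B precomputes prefix-sum arrays for the three buckets and binary-searches the answer m itself, testing feasibility of each candidate total by scanning the splits i+(m-i); different algorithm (bisection over a monotone feasibility predicate) and data structure (prefix-sum arrays).
import Mathlib
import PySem

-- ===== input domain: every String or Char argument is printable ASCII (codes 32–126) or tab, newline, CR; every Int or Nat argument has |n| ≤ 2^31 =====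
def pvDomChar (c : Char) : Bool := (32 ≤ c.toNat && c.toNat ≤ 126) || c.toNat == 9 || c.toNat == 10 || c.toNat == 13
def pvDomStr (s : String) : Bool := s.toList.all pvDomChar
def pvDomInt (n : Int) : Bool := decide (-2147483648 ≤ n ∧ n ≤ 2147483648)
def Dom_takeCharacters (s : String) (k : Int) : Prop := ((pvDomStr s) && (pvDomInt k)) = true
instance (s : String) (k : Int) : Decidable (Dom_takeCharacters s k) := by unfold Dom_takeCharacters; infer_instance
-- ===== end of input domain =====

-- B replaces A's expand-right sliding window by binary search on the answer m itself,
-- testing each candidate total with prefix-sum arrays (alternative algorithm).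

-- ===== PORT A =====
-- A's inner `while`: expand `right` while the window stays within the budgets.
-- `Sum.inl` is Python's early `return sz - res`, `Sum.inr` the state at loop exit.
-- (`xs.length ≤ right` transcribes Python's `right == sz`: in every reachable state
-- right ≤ sz, the inequality is only a termination guard; `xs.getD right ' '` is
-- s[right], whose index is in range exactly because that test came back False.)
def tkAInner (xs : List Char) (aN bN cN : Int) (left right : Nat)
    (res ca cb cc : Int) : Int ⊕ (Nat × Int × Int × Int × Int) :=
  if ca ≤ aN ∧ cb ≤ bN ∧ cc ≤ cN then
    let res' := max res ((right : Int) - (left : Int))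
    if xs.length ≤ right then Sum.inl ((xs.length : Int) - res')
    else
      let ch := xs.getD right ' '
      if ch = 'a' then tkAInner xs aN bN cN left (right+1) res' (ca+1) cb cc
      else if ch = 'b' then tkAInner xs aN bN cN left (right+1) res' ca (cb+1) cc
      else tkAInner xs aN bN cN left (right+1) res' ca cb (cc+1)
  else Sum.inr (right, res, ca, cb, cc)
termination_by xs.length - right
decreasing_by all_goals exact Nat.sub_succ_lt_self _ _ (Nat.lt_of_not_le (by assumption))

-- A's outer `for left in range(sz)` with the running state; `xs.getD left ' '` is
-- s[left] (left < sz under the `if`).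
def tkAOuter (xs : List Char) (aN bN cN : Int) (left right : Nat)
    (res ca cb cc : Int) : Int :=
  if left < xs.length then
    match tkAInner xs aN bN cN left right res ca cb cc with
    | Sum.inl v => v
    | Sum.inr (r', res', ca', cb', cc') =>
      let ch := xs.getD left ' '
      if ch = 'a' then tkAOuter xs aN bN cN (left+1) r' res' (ca'-1) cb' cc'
      else if ch = 'b' then tkAOuter xs aN bN cN (left+1) r' res' ca' (cb'-1) cc'
      else tkAOuter xs aN bN cN (left+1) r' res' ca' cb' (cc'-1)
  else (xs.length : Int) - res
termination_by xs.length - left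
decreasing_by all_goals exact Nat.sub_succ_lt_self _ _ (by assumption)

def takeCharacters (s : String) (k : Int) : Int :=
  let xs := s.toList
  let nums := xs.foldl (fun (t : Int × Int × Int) ch =>
      if ch = 'a' then (t.1 + 1, t.2.1, t.2.2)
      else if ch = 'b' then (t.1, t.2.1 + 1, t.2.2)
      else (t.1, t.2.1, t.2.2 + 1)) (-k, -k, -k)
  if nums.1 < 0 ∨ nums.2.1 < 0 ∨ nums.2.2 < 0 then -1
  else tkAOuter xs nums.1 nums.2.1 nums.2.2 0 0 0 0 0 0

-- ===== PORT B =====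
-- B's building pass: running counts (pa, pb, pc) and the three prefix-sum arrays
-- Pa, Pb, Pc (Python appends to the lists as it walks the string).
def tkBBuild (xs : List Char) : (Int × Int × Int) × (List Int × List Int × List Int) :=
  xs.foldl (fun st ch =>
    let c' : Int × Int × Int :=
      if ch = 'a' then (st.1.1 + 1, st.1.2.1, st.1.2.2)
      else if ch = 'b' then (st.1.1, st.1.2.1 + 1, st.1.2.2)
      else (st.1.1, st.1.2.1, st.1.2.2 + 1)
    (c', (st.2.1 ++ [c'.1], st.2.2.1 ++ [c'.2.1], st.2.2.2 ++ [c'.2.2])))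
    ((0, 0, 0), ([0], [0], [0]))

-- B's `ok(m)` loop body: `for i in range(m + 1)` with early `return True`;
-- `Pa.getD i 0` is Python's Pa[i] (all indices are in range: i ≤ m ≤ n).
def tkBOkGo (Pa Pb Pc : List Int) (n : Nat) (k : Int) (m i : Nat) : Bool :=
  if i ≤ m then
    if k ≤ Pa.getD i 0 + Pa.getD n 0 - Pa.getD (n - (m - i)) 0 ∧
       k ≤ Pb.getD i 0 + Pb.getD n 0 - Pb.getD (n - (m - i)) 0 ∧
       k ≤ Pc.getD i 0 + Pc.getD n 0 - Pc.getD (n - (m - i)) 0 then true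
    else tkBOkGo Pa Pb Pc n k m (i+1)
  else false
termination_by m + 1 - i
decreasing_by all_goals exact Nat.sub_succ_lt_self _ _ (Nat.lt_succ_of_le (by assumption))

def tkBOk (Pa Pb Pc : List Int) (n : Nat) (k : Int) (m : Nat) : Bool :=
  tkBOkGo Pa Pb Pc n k m 0

-- B's bisection `while lo < hi` (mid = (lo+hi)//2; values stay non-negative, so
-- Nat division is exactly Python's floor division here).
def tkBSearch (Pa Pb Pc : List Int) (n : Nat) (k : Int) (lo hi : Nat) : Nat :=
  if lo < hi then
    if tkBOk Pa Pb Pc n k ((lo + hi) / 2) then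
      tkBSearch Pa Pb Pc n k lo ((lo + hi) / 2)
    else
      tkBSearch Pa Pb Pc n k ((lo + hi) / 2 + 1) hi
  else lo
termination_by hi - lo
decreasing_by all_goals omega

def takeCharacters_alt (s : String) (k : Int) : Int :=
  let xs := s.toList
  let n := xs.length
  let r := tkBBuild xs
  let Pa := r.2.1
  let Pb := r.2.2.1
  let Pc := r.2.2.2
  if Pa.getD n 0 < k ∨ Pb.getD n 0 < k ∨ Pc.getD n 0 < k then -1
  else ((tkBSearch Pa Pb Pc n k 0 n : Nat) : Int)

-- ===== PRECONDITION & SPEC =====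
def Spec_takeCharacters (s : String) (k : Int) (out : Int) : Prop := out = takeCharacters_alt s k
instance (s : String) (k : Int) (out : Int) : Decidable (Spec_takeCharacters s k out) := by unfold Spec_takeCharacters; infer_instance

-- ===== CLAIM (what is proved, stated in full; the proofs are below) =====
def Claim_equal_takeCharacters : Prop := ∀ (s : String) (k : Int), Dom_takeCharacters s k → Spec_takeCharacters s k (takeCharacters s k)

-- ===== LEMMAS AND PROOFS =====

-- count of one bucket inside the first i characters
def pvCnt (p : Char → Bool) (xs : List Char) (i : Nat) : Int := ((xs.take i).countP p : Int)

def pvA : Char → Bool := (· == 'a')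
def pvB : Char → Bool := (· == 'b')
def pvC : Char → Bool := fun c => !(c == 'a') && !(c == 'b')

-- the window (i, r] budgets test of A = "prefix i + suffix (n-r) holds ≥ k of each"
abbrev pvW (xs : List Char) (k : Int) (i r : Nat) : Prop :=
  pvCnt pvA xs r - pvCnt pvA xs i ≤ pvCnt pvA xs xs.length - k ∧
  pvCnt pvB xs r - pvCnt pvB xs i ≤ pvCnt pvB xs xs.length - k ∧
  pvCnt pvC xs r - pvCnt pvC xs i ≤ pvCnt pvC xs xs.length - k

-- the furthest right end of a feasible window starting at i
def pvF (xs : List Char) (k : Int) (i : Nat) : Nat :=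
  Nat.findGreatest (fun r => i ≤ r ∧ pvW xs k i r) xs.length

-- max over l' ∈ [l, n] of (pvF l' - l')
def pvM (xs : List Char) (k : Int) (l : Nat) : Int :=
  if l < xs.length then max ((pvF xs k l : Int) - l) (pvM xs k (l+1))
  else (pvF xs k l : Int) - (l : Int)
termination_by xs.length - l
decreasing_by all_goals exact Nat.sub_succ_lt_self _ _ (by assumption)


-- feasibility: the string holds at least k of each bucket
def pvFeas (xs : List Char) (k : Int) : Prop :=
  k ≤ pvCnt pvA xs xs.length ∧ k ≤ pvCnt pvB xs xs.length ∧ k ≤ pvCnt pvC xs xs.length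

-- ---- counting facts ----
lemma pvCnt_mono (p : Char → Bool) (xs : List Char) {i j : Nat} (h : i ≤ j) :
    pvCnt p xs i ≤ pvCnt p xs j := by
  unfold pvCnt
  have h1 : xs.take i = (xs.take j).take i := by
    rw [List.take_take, Nat.min_eq_left h]
  rw [h1]
  exact_mod_cast (List.take_sublist _ _).countP_le (p := p)

lemma pvCnt_succ (p : Char → Bool) (xs : List Char) {r : Nat} (h : r < xs.length) :
    pvCnt p xs (r+1) = pvCnt p xs r + (if p (xs.getD r ' ') then 1 else 0) := by
  unfold pvCnt
  rw [List.take_succ]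
  have h1 : xs[r]? = some xs[r] := List.getElem?_eq_getElem h
  have h2 : xs.getD r ' ' = xs[r] := List.getD_eq_getElem xs ' ' h
  rw [h1, h2, List.countP_append]
  by_cases hp : p xs[r] <;> simp [hp]

-- ---- the feasible-window characterization ----
lemma pvW_refl (xs : List Char) (k : Int) (hk : pvFeas xs k) (i : Nat) (hi : i ≤ xs.length) :
    pvW xs k i i := by
  obtain ⟨h1, h2, h3⟩ := hk
  exact ⟨by omega, by omega, by omega⟩

lemma pvF_le (xs : List Char) (k : Int) (i : Nat) : pvF xs k i ≤ xs.length :=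
  Nat.findGreatest_le _

lemma pvF_ge (xs : List Char) (k : Int) (hk : pvFeas xs k) {i : Nat} (hi : i ≤ xs.length) :
    i ≤ pvF xs k i :=
  Nat.le_findGreatest (P := fun r => i ≤ r ∧ pvW xs k i r) hi ⟨le_rfl, pvW_refl xs k hk i hi⟩

lemma pvW_f (xs : List Char) (k : Int) (hk : pvFeas xs k) {i : Nat} (hi : i ≤ xs.length) :
    pvW xs k i (pvF xs k i) :=
  (Nat.findGreatest_spec (P := fun r => i ≤ r ∧ pvW xs k i r) hi ⟨le_rfl, pvW_refl xs k hk i hi⟩).2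

lemma pvW_iff (xs : List Char) (k : Int) (hk : pvFeas xs k) {i q : Nat}
    (hi : i ≤ xs.length) (hq : q ≤ xs.length) :
    pvW xs k i q ↔ q ≤ pvF xs k i := by
  constructor
  · intro hW
    by_cases hic : i ≤ q
    · exact Nat.le_findGreatest (P := fun r => i ≤ r ∧ pvW xs k i r) hq ⟨hic, hW⟩
    · exact le_trans (le_of_lt (by omega)) (pvF_ge xs k hk hi)
  · intro hqf
    by_cases hic : i ≤ q
    · obtain ⟨w1, w2, w3⟩ := pvW_f xs k hk hi
      have m1 := pvCnt_mono pvA xs hqf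
      have m2 := pvCnt_mono pvB xs hqf
      have m3 := pvCnt_mono pvC xs hqf
      exact ⟨by omega, by omega, by omega⟩
    · obtain ⟨h1, h2, h3⟩ := hk
      have m1 := pvCnt_mono pvA xs (le_of_lt (by omega : q < i))
      have m2 := pvCnt_mono pvB xs (le_of_lt (by omega : q < i))
      have m3 := pvCnt_mono pvC xs (le_of_lt (by omega : q < i))
      have c1 := pvCnt_mono pvA xs hi
      have c2 := pvCnt_mono pvB xs hi
      have c3 := pvCnt_mono pvC xs hi
      exact ⟨by omega, by omega, by omega⟩

lemma pvF_mono (xs : List Char) (k : Int) (hk : pvFeas xs k) {i i' : Nat}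
    (hii : i ≤ i') (hi' : i' ≤ xs.length) : pvF xs k i ≤ pvF xs k i' := by
  by_cases h : pvF xs k i ≤ i'
  · exact le_trans h (pvF_ge xs k hk hi')
  · have hfi : pvW xs k i (pvF xs k i) := pvW_f xs k hk (le_trans hii hi')
    have hW : pvW xs k i' (pvF xs k i) := by
      obtain ⟨w1, w2, w3⟩ := hfi
      have m1 := pvCnt_mono pvA xs hii
      have m2 := pvCnt_mono pvB xs hii
      have m3 := pvCnt_mono pvC xs hii
      exact ⟨by omega, by omega, by omega⟩
    exact (pvW_iff xs k hk hi' (pvF_le xs k i)).1 hW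

lemma pvF_length (xs : List Char) (k : Int) (hk : pvFeas xs k) :
    pvF xs k xs.length = xs.length :=
  le_antisymm (pvF_le xs k _) (pvF_ge xs k hk le_rfl)

-- ---- facts about the running maximum pvM ----
lemma pvM_last (xs : List Char) (k : Int) (hk : pvFeas xs k) : pvM xs k xs.length = 0 := by
  rw [pvM]
  simp [pvF_length xs k hk]

lemma pvM_nonneg (xs : List Char) (k : Int) (hk : pvFeas xs k) {l : Nat}
    (hl : l ≤ xs.length) : 0 ≤ pvM xs k l := by
  induction hd : xs.length - l generalizing l with
  | zero =>
    have : l = xs.length := by omega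
    rw [this, pvM_last xs k hk]
  | succ d ih =>
    rw [pvM, if_pos (by omega : l < xs.length)]
    have := ih (l := l+1) (by omega) (by omega)
    omega

lemma pvM_of_f_eq_n (xs : List Char) (k : Int) (hk : pvFeas xs k) {l : Nat}
    (hl : l ≤ xs.length) (hf : pvF xs k l = xs.length) :
    pvM xs k l = (xs.length : Int) - l := by
  induction hd : xs.length - l generalizing l with
  | zero =>
    have hln : l = xs.length := by omega
    subst hln
    rw [pvM_last xs k hk]; omega
  | succ d ih =>
    have hlt : l < xs.length := by omega
    rw [pvM, if_pos hlt, hf]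
    have hfs : pvF xs k (l+1) = xs.length :=
      le_antisymm (pvF_le xs k _) (hf ▸ pvF_mono xs k hk (by omega) (by omega))
    have := ih (l := l+1) (by omega) hfs (by omega)
    rw [this]
    omega

lemma pvM_le (xs : List Char) (k : Int) (hk : pvFeas xs k) {l : Nat}
    (hl : l ≤ xs.length) : pvM xs k l ≤ (xs.length : Int) - l := by
  induction hd : xs.length - l generalizing l with
  | zero =>
    have : l = xs.length := by omega
    rw [this, pvM_last xs k hk]; omega
  | succ d ih =>
    rw [pvM, if_pos (by omega : l < xs.length)]
    have h1 := ih (l := l+1) (by omega) (by omega)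
    have h2 : pvF xs k l ≤ xs.length := pvF_le xs k l
    have h2' : ((pvF xs k l : Nat) : Int) ≤ (xs.length : Int) := by exact_mod_cast h2
    push_cast at h1 ⊢
    omega

lemma pvM_ge_f (xs : List Char) (k : Int) {l i : Nat}
    (hli : l ≤ i) (hi : i ≤ xs.length) :
    (pvF xs k i : Int) - i ≤ pvM xs k l := by
  induction hd : xs.length - l generalizing l with
  | zero =>
    have h1 : l = xs.length := by omega
    have h2 : i = xs.length := by omega
    subst h1; subst h2
    rw [pvM, if_neg (by omega)]
  | succ d ih =>
    rw [pvM, if_pos (by omega : l < xs.length)]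
    by_cases he : i = l
    · subst he; exact le_max_left _ _
    · have := ih (l := l+1) (by omega) (by omega)
      exact le_trans this (le_max_right _ _)

lemma pvM_exists (xs : List Char) (k : Int) {l : Nat} (hl : l ≤ xs.length) :
    ∃ i, l ≤ i ∧ i ≤ xs.length ∧ pvM xs k l = (pvF xs k i : Int) - i := by
  induction hd : xs.length - l generalizing l with
  | zero =>
    have : l = xs.length := by omega
    subst this
    exact ⟨xs.length, le_rfl, le_rfl, by rw [pvM, if_neg (by omega)]⟩
  | succ d ih =>
    have hlt : l < xs.length := by omega
    obtain ⟨i, hi1, hi2, hi3⟩ := ih (l := l+1) (by omega) (by omega)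
    by_cases hc : pvM xs k (l+1) ≤ (pvF xs k l : Int) - l
    · exact ⟨l, le_rfl, by omega, by rw [pvM, if_pos hlt, max_eq_left hc]⟩
    · exact ⟨i, by omega, hi2, by rw [pvM, if_pos hlt, max_eq_right (le_of_lt (by omega))]; exact hi3⟩

lemma pv_max_collapse (res x y : Int) (h : x ≤ y) : max (max res x) y = max res y := by
  rw [max_assoc, max_eq_right h]

-- ---- A's inner while loop ----
lemma tkAInner_exit (xs : List Char) (aN bN cN : Int) (left right : Nat)
    (res ca cb cc : Int) (h : ¬(ca ≤ aN ∧ cb ≤ bN ∧ cc ≤ cN)) :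
    tkAInner xs aN bN cN left right res ca cb cc = Sum.inr (right, res, ca, cb, cc) := by
  rw [tkAInner, if_neg h]

lemma tkAInner_spec (xs : List Char) (k : Int) (hk : pvFeas xs k) (l : Nat)
    (hl : l ≤ xs.length) :
    ∀ d r (res ca cb cc : Int), xs.length - r = d → l ≤ r → r ≤ xs.length →
    pvW xs k l r →
    ca = pvCnt pvA xs r - pvCnt pvA xs l →
    cb = pvCnt pvB xs r - pvCnt pvB xs l →
    cc = pvCnt pvC xs r - pvCnt pvC xs l →
    tkAInner xs (pvCnt pvA xs xs.length - k) (pvCnt pvB xs xs.length - k)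
        (pvCnt pvC xs xs.length - k) l r res ca cb cc =
      (if pvF xs k l = xs.length then
        Sum.inl ((xs.length : Int) - max res ((xs.length : Int) - (l : Int)))
      else
        Sum.inr (pvF xs k l + 1, max res ((pvF xs k l : Int) - (l : Int)),
          pvCnt pvA xs (pvF xs k l + 1) - pvCnt pvA xs l,
          pvCnt pvB xs (pvF xs k l + 1) - pvCnt pvB xs l,
          pvCnt pvC xs (pvF xs k l + 1) - pvCnt pvC xs l)) := by
  intro d
  induction d with
  | zero =>
    intro r res ca cb cc h0 hlr hrn hW hca hcb hcc
    subst hca hcb hcc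
    have hr : r = xs.length := by omega
    subst hr
    have hfl : pvF xs k l = xs.length :=
      le_antisymm (pvF_le xs k l) ((pvW_iff xs k hk hl le_rfl).1 hW)
    obtain ⟨w1, w2, w3⟩ := hW
    rw [tkAInner, if_pos ⟨w1, w2, w3⟩, if_pos (le_refl xs.length), if_pos hfl]
  | succ d ih =>
    intro r res ca cb cc h0 hlr hrn hW hca hcb hcc
    subst hca hcb hcc
    have hrlt : r < xs.length := by omega
    have hrf : r ≤ pvF xs k l := (pvW_iff xs k hk hl hrn).1 hW
    have ea := pvCnt_succ pvA xs hrlt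
    have eb := pvCnt_succ pvB xs hrlt
    have ec := pvCnt_succ pvC xs hrlt
    obtain ⟨w1, w2, w3⟩ := id hW
    rw [tkAInner, if_pos ⟨w1, w2, w3⟩, if_neg (by omega : ¬ xs.length ≤ r)]
    have hstep : ∀ ca' cb' cc' : Int,
        ca' = pvCnt pvA xs (r+1) - pvCnt pvA xs l →
        cb' = pvCnt pvB xs (r+1) - pvCnt pvB xs l →
        cc' = pvCnt pvC xs (r+1) - pvCnt pvC xs l →
        tkAInner xs (pvCnt pvA xs xs.length - k) (pvCnt pvB xs xs.length - k)
            (pvCnt pvC xs xs.length - k) l (r+1)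
            (max res ((r : Int) - (l : Int))) ca' cb' cc' =
          (if pvF xs k l = xs.length then
            Sum.inl ((xs.length : Int) - max res ((xs.length : Int) - (l : Int)))
          else
            Sum.inr (pvF xs k l + 1, max res ((pvF xs k l : Int) - (l : Int)),
              pvCnt pvA xs (pvF xs k l + 1) - pvCnt pvA xs l,
              pvCnt pvB xs (pvF xs k l + 1) - pvCnt pvB xs l,
              pvCnt pvC xs (pvF xs k l + 1) - pvCnt pvC xs l)) := by
      intro ca' cb' cc' hca' hcb' hcc'
      subst hca' hcb' hcc'
      by_cases hW' : pvW xs k l (r+1)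
      · have hr1f : r + 1 ≤ pvF xs k l := (pvW_iff xs k hk hl (by omega)).1 hW'
        rw [ih (r+1) _ _ _ _ (by omega) (by omega) (by omega) hW' rfl rfl rfl]
        have hfle : (r : Int) - (l : Int) ≤ (pvF xs k l : Int) - (l : Int) := by
          have : (r : Int) ≤ (pvF xs k l : Int) := by exact_mod_cast hrf
          omega
        have hnle : (r : Int) - (l : Int) ≤ (xs.length : Int) - (l : Int) := by
          have : (r : Int) ≤ (xs.length : Int) := by exact_mod_cast hrn
          omega
        by_cases hfn : pvF xs k l = xs.length
        · rw [if_pos hfn, if_pos hfn, pv_max_collapse res _ _ hnle]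
        · rw [if_neg hfn, if_neg hfn, pv_max_collapse res _ _ hfle]
      · have hfr : pvF xs k l = r := by
          have : ¬ (r + 1 ≤ pvF xs k l) := fun h =>
            hW' ((pvW_iff xs k hk hl (by omega)).2 h)
          omega
        rw [tkAInner_exit]
        · rw [if_neg (by omega : ¬ pvF xs k l = xs.length), hfr]
        · intro hc
          exact hW' hc
    by_cases hcha : xs.getD r ' ' = 'a'
    · rw [if_pos hcha]
      rw [show pvA (xs.getD r ' ') = true by rw [hcha]; rfl] at ea
      rw [show pvB (xs.getD r ' ') = false by rw [hcha]; rfl] at eb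
      rw [show pvC (xs.getD r ' ') = false by rw [hcha]; rfl] at ec
      norm_num at ea eb ec
      apply hstep <;> omega
    · rw [if_neg hcha]
      by_cases hchb : xs.getD r ' ' = 'b'
      · rw [if_pos hchb]
        rw [show pvA (xs.getD r ' ') = false by rw [hchb]; rfl] at ea
        rw [show pvB (xs.getD r ' ') = true by rw [hchb]; rfl] at eb
        rw [show pvC (xs.getD r ' ') = false by rw [hchb]; rfl] at ec
        norm_num at ea eb ec
        apply hstep <;> omega
      · rw [if_neg hchb]
        rw [show pvA (xs.getD r ' ') = false by
              simp only [pvA, beq_eq_false_iff_ne, ne_eq]; exact hcha] at ea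
        rw [show pvB (xs.getD r ' ') = false by
              simp only [pvB, beq_eq_false_iff_ne, ne_eq]; exact hchb] at eb
        rw [show pvC (xs.getD r ' ') = true by
              simp only [pvC, Bool.and_eq_true, Bool.not_eq_true', beq_eq_false_iff_ne, ne_eq]
              exact ⟨hcha, hchb⟩] at ec
        norm_num at ea eb ec
        apply hstep <;> omega


lemma pvM_step (xs : List Char) (k : Int) {l : Nat} (hlt : l < xs.length) :
    pvM xs k l = max ((pvF xs k l : Int) - (l : Int)) (pvM xs k (l+1)) := by
  rw [pvM, if_pos hlt]

-- ---- A's outer for loop ----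
lemma tkAOuter_spec (xs : List Char) (k : Int) (hk : pvFeas xs k) :
    ∀ d l r (res ca cb cc : Int), xs.length - l = d → l ≤ xs.length → l ≤ r →
    r ≤ xs.length → r ≤ pvF xs k l + 1 →
    (r = pvF xs k l + 1 → (pvF xs k l : Int) - (l : Int) ≤ res) →
    0 ≤ res →
    ca = pvCnt pvA xs r - pvCnt pvA xs l →
    cb = pvCnt pvB xs r - pvCnt pvB xs l →
    cc = pvCnt pvC xs r - pvCnt pvC xs l →
    tkAOuter xs (pvCnt pvA xs xs.length - k) (pvCnt pvB xs xs.length - k)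
        (pvCnt pvC xs xs.length - k) l r res ca cb cc =
      (xs.length : Int) - max res (pvM xs k l) := by
  intro d
  induction d with
  | zero =>
    intro l r res ca cb cc h0 hl hlr hrn _ _ hres hca hcb hcc
    have hln : l = xs.length := by omega
    subst hln
    rw [tkAOuter, if_neg (by omega), pvM_last xs k hk, max_eq_left hres]
  | succ d ih =>
    intro l r res ca cb cc h0 hl hlr hrn hrf1 himp hres hca hcb hcc
    subst hca hcb hcc
    have hlt : l < xs.length := by omega
    have hgel : l ≤ pvF xs k l := pvF_ge xs k hk hl
    have hfle : pvF xs k l ≤ xs.length := pvF_le xs k l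
    have ea := pvCnt_succ pvA xs hlt
    have eb := pvCnt_succ pvB xs hlt
    have ec := pvCnt_succ pvC xs hlt
    rw [tkAOuter, if_pos hlt]
    have hstep : ∀ r' : Nat, ∀ res' ca' cb' cc' : Int,
        l + 1 ≤ r' → r' ≤ xs.length → r' ≤ pvF xs k (l+1) + 1 →
        (r' = pvF xs k (l+1) + 1 → (pvF xs k (l+1) : Int) - ((l:Int)+1) ≤ res') →
        0 ≤ res' →
        ca' = pvCnt pvA xs r' - pvCnt pvA xs (l+1) →
        cb' = pvCnt pvB xs r' - pvCnt pvB xs (l+1) →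
        cc' = pvCnt pvC xs r' - pvCnt pvC xs (l+1) →
        tkAOuter xs (pvCnt pvA xs xs.length - k) (pvCnt pvB xs xs.length - k)
            (pvCnt pvC xs xs.length - k) (l+1) r' res' ca' cb' cc' =
          (xs.length : Int) - max res' (pvM xs k (l+1)) := by
      intro r' res' ca' cb' cc' h1 h2 h3 h4 h5 h6 h7 h8
      exact ih (l+1) r' res' ca' cb' cc' (by omega) (by omega) h1 h2 h3
        (by intro he; have := h4 he; push_cast; push_cast at this; omega) h5 h6 h7 h8
    by_cases hWr : pvW xs k l r
    · rw [tkAInner_spec xs k hk l hl _ r res _ _ _ rfl hlr hrn hWr rfl rfl rfl]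
      by_cases hfn : pvF xs k l = xs.length
      · rw [if_pos hfn]
        rw [pvM_of_f_eq_n xs k hk hl hfn]
      · rw [if_neg hfn]
        simp only []
        have hflt : pvF xs k l < xs.length := by omega
        have hmono : pvF xs k l ≤ pvF xs k (l+1) := pvF_mono xs k hk (by omega) (by omega)
        have hres' : (0:Int) ≤ max res ((pvF xs k l : Int) - (l : Int)) := le_max_of_le_left hres
        have hrw : max (max res ((pvF xs k l : Int) - (l:Int))) (pvM xs k (l+1))
            = max res (pvM xs k l) := by
          rw [max_assoc, ← pvM_step xs k hlt]
        by_cases hcha : xs.getD l ' ' = 'a'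
        · rw [if_pos hcha]
          rw [show pvA (xs.getD l ' ') = true by rw [hcha]; rfl] at ea
          rw [show pvB (xs.getD l ' ') = false by rw [hcha]; rfl] at eb
          rw [show pvC (xs.getD l ' ') = false by rw [hcha]; rfl] at ec
          norm_num at ea eb ec
          rw [hstep (pvF xs k l + 1) _ _ _ _ (by omega) (by omega) (by omega)
            (by intro he; have : pvF xs k (l+1) = pvF xs k l := by omega
                rw [this]; push_cast; omega)
            hres' (by omega) (by omega) (by omega), hrw]
        · rw [if_neg hcha]
          by_cases hchb : xs.getD l ' ' = 'b'
          · rw [if_pos hchb]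
            rw [show pvA (xs.getD l ' ') = false by rw [hchb]; rfl] at ea
            rw [show pvB (xs.getD l ' ') = true by rw [hchb]; rfl] at eb
            rw [show pvC (xs.getD l ' ') = false by rw [hchb]; rfl] at ec
            norm_num at ea eb ec
            rw [hstep (pvF xs k l + 1) _ _ _ _ (by omega) (by omega) (by omega)
              (by intro he; have : pvF xs k (l+1) = pvF xs k l := by omega
                  rw [this]; push_cast; omega)
              hres' (by omega) (by omega) (by omega), hrw]
          · rw [if_neg hchb]
            rw [show pvA (xs.getD l ' ') = false by
                  simp only [pvA, beq_eq_false_iff_ne, ne_eq]; exact hcha] at ea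
            rw [show pvB (xs.getD l ' ') = false by
                  simp only [pvB, beq_eq_false_iff_ne, ne_eq]; exact hchb] at eb
            rw [show pvC (xs.getD l ' ') = true by
                  simp only [pvC, Bool.and_eq_true, Bool.not_eq_true', beq_eq_false_iff_ne, ne_eq]
                  exact ⟨hcha, hchb⟩] at ec
            norm_num at ea eb ec
            rw [hstep (pvF xs k l + 1) _ _ _ _ (by omega) (by omega) (by omega)
              (by intro he; have : pvF xs k (l+1) = pvF xs k l := by omega
                  rw [this]; push_cast; omega)
              hres' (by omega) (by omega) (by omega), hrw]
    · have hreq : r = pvF xs k l + 1 := by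
        have : ¬ (r ≤ pvF xs k l) := fun h => hWr ((pvW_iff xs k hk hl hrn).2 h)
        omega
      have hresfl : (pvF xs k l : Int) - (l : Int) ≤ res := himp hreq
      rw [tkAInner_exit _ _ _ _ _ _ _ _ _ _ (fun hc => hWr hc)]
      simp only []
      have hmono : pvF xs k l ≤ pvF xs k (l+1) := pvF_mono xs k hk (by omega) (by omega)
      have hmaxr : max res ((pvF xs k l : Int) - (l : Int)) = res := max_eq_left hresfl
      have hrw2 : max res (pvM xs k (l+1)) = max res (pvM xs k l) := by
        rw [pvM_step xs k hlt, ← max_assoc, hmaxr]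
      by_cases hcha : xs.getD l ' ' = 'a'
      · rw [if_pos hcha]
        rw [show pvA (xs.getD l ' ') = true by rw [hcha]; rfl] at ea
        rw [show pvB (xs.getD l ' ') = false by rw [hcha]; rfl] at eb
        rw [show pvC (xs.getD l ' ') = false by rw [hcha]; rfl] at ec
        norm_num at ea eb ec
        rw [hstep r _ _ _ _ (by omega) (by omega) (by omega)
          (by intro he; have : pvF xs k (l+1) = pvF xs k l := by omega
              rw [this]; push_cast; push_cast at hresfl; omega)
          hres (by omega) (by omega) (by omega), hrw2]
      · rw [if_neg hcha]
        by_cases hchb : xs.getD l ' ' = 'b'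
        · rw [if_pos hchb]
          rw [show pvA (xs.getD l ' ') = false by rw [hchb]; rfl] at ea
          rw [show pvB (xs.getD l ' ') = true by rw [hchb]; rfl] at eb
          rw [show pvC (xs.getD l ' ') = false by rw [hchb]; rfl] at ec
          norm_num at ea eb ec
          rw [hstep r _ _ _ _ (by omega) (by omega) (by omega)
            (by intro he; have : pvF xs k (l+1) = pvF xs k l := by omega
                rw [this]; push_cast; push_cast at hresfl; omega)
            hres (by omega) (by omega) (by omega), hrw2]
        · rw [if_neg hchb]
          rw [show pvA (xs.getD l ' ') = false by
                simp only [pvA, beq_eq_false_iff_ne, ne_eq]; exact hcha] at ea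
          rw [show pvB (xs.getD l ' ') = false by
                simp only [pvB, beq_eq_false_iff_ne, ne_eq]; exact hchb] at eb
          rw [show pvC (xs.getD l ' ') = true by
                simp only [pvC, Bool.and_eq_true, Bool.not_eq_true', beq_eq_false_iff_ne, ne_eq]
                exact ⟨hcha, hchb⟩] at ec
          norm_num at ea eb ec
          rw [hstep r _ _ _ _ (by omega) (by omega) (by omega)
            (by intro he; have : pvF xs k (l+1) = pvF xs k l := by omega
                rw [this]; push_cast; push_cast at hresfl; omega)
            hres (by omega) (by omega) (by omega), hrw2]

-- ---- the first counting pass of A ----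
lemma pv_foldl_counts (xs : List Char) : ∀ x y z : Int,
    List.foldl (fun (t : Int × Int × Int) ch =>
      if ch = 'a' then (t.1 + 1, t.2.1, t.2.2)
      else if ch = 'b' then (t.1, t.2.1 + 1, t.2.2)
      else (t.1, t.2.1, t.2.2 + 1)) (x, y, z) xs
    = (x + (xs.countP pvA : Int), y + (xs.countP pvB : Int), z + (xs.countP pvC : Int)) := by
  induction xs with
  | nil => intro x y z; simp
  | cons hd tl ih =>
    intro x y z
    simp only [List.foldl_cons, List.countP_cons]
    by_cases ha : hd = 'a'
    · rw [if_pos ha, ih]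
      rw [show pvA hd = true by rw [ha]; rfl]
      rw [show pvB hd = false by rw [ha]; rfl]
      rw [show pvC hd = false by rw [ha]; rfl]
      simp only [Prod.mk.injEq]
      norm_num
      all_goals omega
    · rw [if_neg ha]
      by_cases hb : hd = 'b'
      · rw [if_pos hb, ih]
        rw [show pvA hd = false by rw [hb]; rfl]
        rw [show pvB hd = true by rw [hb]; rfl]
        rw [show pvC hd = false by rw [hb]; rfl]
        simp only [Prod.mk.injEq]
        norm_num
        all_goals omega
      · rw [if_neg hb, ih]
        rw [show pvA hd = false by
              simp only [pvA, beq_eq_false_iff_ne, ne_eq]; exact ha]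
        rw [show pvB hd = false by
              simp only [pvB, beq_eq_false_iff_ne, ne_eq]; exact hb]
        rw [show pvC hd = true by
              simp only [pvC, Bool.and_eq_true, Bool.not_eq_true', beq_eq_false_iff_ne, ne_eq]
              exact ⟨ha, hb⟩]
        simp only [Prod.mk.injEq]
        norm_num
        all_goals omega

lemma pvCnt_full (p : Char → Bool) (xs : List Char) :
    pvCnt p xs xs.length = (xs.countP p : Int) := by
  unfold pvCnt
  rw [List.take_length]

-- ---- B's building pass: the lists it builds are the prefix-count tables ----
lemma pvCnt_append_le (p : Char → Bool) (ys : List Char) (c : Char) {i : Nat}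
    (h : i ≤ ys.length) : pvCnt p (ys ++ [c]) i = pvCnt p ys i := by
  unfold pvCnt
  rw [List.take_append_of_le_length h]

lemma pvCnt_append_last (p : Char → Bool) (ys : List Char) (c : Char) :
    pvCnt p (ys ++ [c]) (ys.length + 1) = pvCnt p ys ys.length + (if p c then 1 else 0) := by
  unfold pvCnt
  rw [List.take_length]
  rw [show ys.length + 1 = (ys ++ [c]).length from by simp]
  rw [List.take_length, List.countP_append]
  by_cases hp : p c <;> simp [hp]

lemma tkBBuild_spec (xs : List Char) :
    tkBBuild xs =
      ((pvCnt pvA xs xs.length, pvCnt pvB xs xs.length, pvCnt pvC xs xs.length),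
       ((List.range (xs.length + 1)).map (pvCnt pvA xs),
        (List.range (xs.length + 1)).map (pvCnt pvB xs),
        (List.range (xs.length + 1)).map (pvCnt pvC xs))) := by
  induction xs using List.reverseRecOn with
  | nil =>
    simp [tkBBuild, pvCnt]
  | append_singleton ys c ih =>
    unfold tkBBuild at ih ⊢
    rw [List.foldl_append, ih]
    simp only [List.foldl_cons, List.foldl_nil, List.length_append, List.length_cons,
      List.length_nil]
    have hmap : ∀ p : Char → Bool,
        (List.range (ys.length + 1)).map (pvCnt p ys)
          = (List.range (ys.length + 1)).map (pvCnt p (ys ++ [c])) := by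
      intro p
      apply List.map_congr_left
      intro i hi
      rw [List.mem_range] at hi
      rw [pvCnt_append_le p ys c (by omega)]
    have hrange : List.range (ys.length + 1 + 1)
        = List.range (ys.length + 1) ++ [ys.length + 1] := List.range_succ
    have ea := pvCnt_append_last pvA ys c
    have eb := pvCnt_append_last pvB ys c
    have ec := pvCnt_append_last pvC ys c
    by_cases hcha : c = 'a'
    · rw [if_pos hcha]
      rw [show pvA c = true by rw [hcha]; rfl] at ea
      rw [show pvB c = false by rw [hcha]; rfl] at eb
      rw [show pvC c = false by rw [hcha]; rfl] at ec
      norm_num at ea eb ec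
      simp only [hrange, List.map_append, List.map_cons, List.map_nil, hmap pvA, hmap pvB,
        hmap pvC, ea, eb, ec]
    · rw [if_neg hcha]
      by_cases hchb : c = 'b'
      · rw [if_pos hchb]
        rw [show pvA c = false by rw [hchb]; rfl] at ea
        rw [show pvB c = true by rw [hchb]; rfl] at eb
        rw [show pvC c = false by rw [hchb]; rfl] at ec
        norm_num at ea eb ec
        simp only [hrange, List.map_append, List.map_cons, List.map_nil, hmap pvA, hmap pvB,
          hmap pvC, ea, eb, ec]
      · rw [if_neg hchb]
        rw [show pvA c = false by
              simp only [pvA, beq_eq_false_iff_ne, ne_eq]; exact hcha] at ea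
        rw [show pvB c = false by
              simp only [pvB, beq_eq_false_iff_ne, ne_eq]; exact hchb] at eb
        rw [show pvC c = true by
              simp only [pvC, Bool.and_eq_true, Bool.not_eq_true', beq_eq_false_iff_ne, ne_eq]
              exact ⟨hcha, hchb⟩] at ec
        norm_num at ea eb ec
        simp only [hrange, List.map_append, List.map_cons, List.map_nil, hmap pvA, hmap pvB,
          hmap pvC, ea, eb, ec]

lemma pv_map_range_getD (f : Nat → Int) (n i : Nat) (h : i < n) :
    ((List.range n).map f).getD i 0 = f i := by
  rw [List.getD_eq_getElem?_getD, List.getElem?_map, List.getElem?_range h]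
  rfl

-- ---- B's ok(m): true iff some split i + (m - i) is feasible ----
lemma tkBOkGo_spec (xs : List Char) (k : Int) (m : Nat) (hm : m ≤ xs.length) :
    ∀ d i, m + 1 - i = d →
    (tkBOkGo ((List.range (xs.length + 1)).map (pvCnt pvA xs))
        ((List.range (xs.length + 1)).map (pvCnt pvB xs))
        ((List.range (xs.length + 1)).map (pvCnt pvC xs)) xs.length k m i = true
      ↔ ∃ i', i ≤ i' ∧ i' ≤ m ∧ pvW xs k i' (xs.length - (m - i'))) := by
  intro d
  induction d with
  | zero =>
    intro i h0
    rw [tkBOkGo, if_neg (by omega)]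
    simp only [Bool.false_eq_true, false_iff]
    rintro ⟨i', h1, h2, _⟩
    omega
  | succ d ih =>
    intro i h0
    rw [tkBOkGo, if_pos (by omega : i ≤ m)]
    have g1 : ∀ p : Char → Bool, ∀ j : Nat, j ≤ xs.length →
        ((List.range (xs.length + 1)).map (pvCnt p xs)).getD j 0 = pvCnt p xs j := by
      intro p j hj
      exact pv_map_range_getD (pvCnt p xs) (xs.length + 1) j (by omega)
    rw [g1 pvA i (by omega), g1 pvA xs.length le_rfl, g1 pvA (xs.length - (m - i)) (by omega),
        g1 pvB i (by omega), g1 pvB xs.length le_rfl, g1 pvB (xs.length - (m - i)) (by omega),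
        g1 pvC i (by omega), g1 pvC xs.length le_rfl, g1 pvC (xs.length - (m - i)) (by omega)]
    by_cases hc :
        k ≤ pvCnt pvA xs i + pvCnt pvA xs xs.length - pvCnt pvA xs (xs.length - (m - i)) ∧
        k ≤ pvCnt pvB xs i + pvCnt pvB xs xs.length - pvCnt pvB xs (xs.length - (m - i)) ∧
        k ≤ pvCnt pvC xs i + pvCnt pvC xs xs.length - pvCnt pvC xs (xs.length - (m - i))
    · rw [if_pos hc]
      simp only [true_iff]
      exact ⟨i, le_rfl, by omega, ⟨by omega, by omega, by omega⟩⟩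
    · rw [if_neg hc]
      rw [ih (i+1) (by omega)]
      constructor
      · rintro ⟨i', h1, h2, h3⟩
        exact ⟨i', by omega, h2, h3⟩
      · rintro ⟨i', h1, h2, h3⟩
        refine ⟨i', ?_, h2, h3⟩
        by_contra hne
        have hii : i' = i := by omega
        subst hii
        obtain ⟨w1, w2, w3⟩ := h3
        exact hc ⟨by omega, by omega, by omega⟩

lemma tkBOk_iff (xs : List Char) (k : Int) (hk : pvFeas xs k) (m : Nat) (hm : m ≤ xs.length) :
    tkBOk ((List.range (xs.length + 1)).map (pvCnt pvA xs))
        ((List.range (xs.length + 1)).map (pvCnt pvB xs))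
        ((List.range (xs.length + 1)).map (pvCnt pvC xs)) xs.length k m = true
      ↔ (xs.length : Int) - pvM xs k 0 ≤ m := by
  unfold tkBOk
  rw [tkBOkGo_spec xs k m hm (m + 1) 0 rfl]
  constructor
  · rintro ⟨i, _, him, hW⟩
    have hc := (pvW_iff xs k hk (by omega : i ≤ xs.length) (by omega)).1 hW
    have hf := pvM_ge_f xs k (Nat.zero_le i) (by omega : i ≤ xs.length)
    omega
  · intro hle
    obtain ⟨l, _, hln, hMl⟩ := pvM_exists xs k (Nat.zero_le xs.length)
    have hfl : pvF xs k l ≤ xs.length := pvF_le xs k l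
    have hgel : l ≤ pvF xs k l := pvF_ge xs k hk hln
    refine ⟨l, Nat.zero_le l, by omega, ?_⟩
    exact (pvW_iff xs k hk hln (by omega)).2 (by omega)

-- ---- B's bisection ----
lemma tkBSearch_spec (Pa Pb Pc : List Int) (n : Nat) (k : Int) (a : Nat)
    (hok : ∀ m : Nat, m < n → (tkBOk Pa Pb Pc n k m = true ↔ a ≤ m)) :
    ∀ d lo hi, hi - lo ≤ d → hi ≤ n → lo ≤ a → a ≤ hi →
    tkBSearch Pa Pb Pc n k lo hi = a := by
  intro d
  induction d with
  | zero =>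
    intro lo hi h0 hn h1 h2
    rw [tkBSearch, if_neg (by omega)]
    omega
  | succ d ih =>
    intro lo hi h0 hn h1 h2
    by_cases hlt : lo < hi
    · rw [tkBSearch, if_pos hlt]
      have hmid1 : lo ≤ (lo + hi) / 2 := by omega
      have hmid2 : (lo + hi) / 2 < hi := by omega
      by_cases ha : a ≤ (lo + hi) / 2
      · rw [if_pos ((hok _ (by omega)).2 ha)]
        exact ih lo ((lo + hi) / 2) (by omega) (by omega) h1 ha
      · rw [if_neg (by
          intro hc
          exact ha ((hok _ (by omega)).1 hc))]
        exact ih ((lo + hi) / 2 + 1) hi (by omega) hn (by omega) h2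
    · rw [tkBSearch, if_neg hlt]
      omega

-- ===== VERDICT (by name: the statement is the Claim_ definition above) =====
theorem takeCharacters_spec : Claim_equal_takeCharacters := by
  unfold Claim_equal_takeCharacters
  intro s k _
  unfold Spec_takeCharacters takeCharacters takeCharacters_alt
  simp only []
  rw [pv_foldl_counts s.toList (-k) (-k) (-k), tkBBuild_spec s.toList]
  simp only []
  have gA : ((List.range (s.toList.length + 1)).map (pvCnt pvA s.toList)).getD s.toList.length 0
      = pvCnt pvA s.toList s.toList.length :=
    pv_map_range_getD _ _ _ (by omega)
  have gB : ((List.range (s.toList.length + 1)).map (pvCnt pvB s.toList)).getD s.toList.length 0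
      = pvCnt pvB s.toList s.toList.length :=
    pv_map_range_getD _ _ _ (by omega)
  have gC : ((List.range (s.toList.length + 1)).map (pvCnt pvC s.toList)).getD s.toList.length 0
      = pvCnt pvC s.toList s.toList.length :=
    pv_map_range_getD _ _ _ (by omega)
  rw [gA, gB, gC]
  have hfullA := pvCnt_full pvA s.toList
  have hfullB := pvCnt_full pvB s.toList
  have hfullC := pvCnt_full pvC s.toList
  by_cases hfeas : pvFeas s.toList k
  · have hf3 := hfeas
    unfold pvFeas at hf3
    rw [if_neg (by omega), if_neg (by omega)]
    rw [show (-k + (s.toList.countP pvA : Int)) = pvCnt pvA s.toList s.toList.length - k from by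
      rw [hfullA]; ring]
    rw [show (-k + (s.toList.countP pvB : Int)) = pvCnt pvB s.toList s.toList.length - k from by
      rw [hfullB]; ring]
    rw [show (-k + (s.toList.countP pvC : Int)) = pvCnt pvC s.toList s.toList.length - k from by
      rw [hfullC]; ring]
    rw [tkAOuter_spec s.toList k hfeas s.toList.length 0 0 0 0 0 0 (by omega) (by omega)
      le_rfl (by omega) (by omega) (by intro he; omega) le_rfl (by omega) (by omega) (by omega)]
    have hM0 : 0 ≤ pvM s.toList k 0 := pvM_nonneg s.toList k hfeas (by omega)
    have hMn : pvM s.toList k 0 ≤ (s.toList.length : Int) := by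
      have := pvM_le s.toList k hfeas (l := 0) (by omega)
      omega
    rw [max_eq_right hM0]
    have haInt : (((s.toList.length : Int) - pvM s.toList k 0).toNat : Int)
        = (s.toList.length : Int) - pvM s.toList k 0 := by omega
    rw [tkBSearch_spec _ _ _ s.toList.length k ((s.toList.length : Int) - pvM s.toList k 0).toNat
      (by
        intro m hmn
        rw [tkBOk_iff s.toList k hfeas m (by omega)]
        omega)
      s.toList.length 0 s.toList.length (by omega) le_rfl (by omega) (by omega)]
    omega
  · have hf3 := hfeas
    unfold pvFeas at hf3
    rw [if_pos (by omega), if_pos (by omega)]
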